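-- pv_equiv track=rewrite | github.com/anojkr/help | interview_bit/hash/relative_ordering.py | solve
-- ===== SOURCE A (Python) =====
-- from collections import OrderedDict
--
-- def solve(A, B):
--
--     h1 = OrderedDict()
--     h2 = OrderedDict()
--
--     for x in A:
--         if x in h1:
--             h1[x]+=1
--             continue
--         h1[x] = 1
--
--     for y in B:
--         if y in h2:
--             h2[y] +=1
--             continue
--         h2[y] = 1
--
--     result = []
--     for k, freq in h2.items():
--         if k in h1:
--             t = h1[k]
--             while t>0:
--                 result.append(k)
--                 t = t-1
--             del h1[k]
--     res = sorted(h1.items())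
--
--     for k, item in res:
--         while (item):
--             result.append(k)
--             item -=1
--     return result
-- ===== SOURCE B (Python) =====
-- def solve(A, B):
--     # Reorder A by B's first-occurrence order; leftovers sorted by value.
--     order = list(dict.fromkeys(B))
--     present = set(order)
--     front = [x for y in order for x in A if x == y]
--     rest = sorted(x for x in A if x not in present)
--     return front + rest
-- ===== Notes on version B (the rewrite author's own statement) =====
-- stated objective: simpler
-- what changed: Replaces the two ordered frequency maps, the delete-and-rebuild loop and the sorted-items replay with a direct construction: one filter pass per distinct value of B to build the front, plus a single sort of the leftover elements of A.
import Mathlib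
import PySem

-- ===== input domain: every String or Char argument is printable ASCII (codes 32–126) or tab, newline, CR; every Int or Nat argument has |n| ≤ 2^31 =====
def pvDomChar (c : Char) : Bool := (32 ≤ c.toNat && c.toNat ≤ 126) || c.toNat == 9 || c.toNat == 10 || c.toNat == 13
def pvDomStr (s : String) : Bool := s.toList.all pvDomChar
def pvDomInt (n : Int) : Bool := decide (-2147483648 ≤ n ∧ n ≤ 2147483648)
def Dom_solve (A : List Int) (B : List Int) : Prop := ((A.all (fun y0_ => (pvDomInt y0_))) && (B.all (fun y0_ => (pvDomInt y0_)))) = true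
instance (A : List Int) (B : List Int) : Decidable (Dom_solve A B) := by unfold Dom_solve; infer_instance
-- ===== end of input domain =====

-- B replaces A's two ordered frequency maps, delete-and-rebuild loop and sorted-items replay
-- with one filter pass per distinct value of B plus a single sort of the leftovers (simpler).

-- ===== PORT A =====
def solve (A : List Int) (B : List Int) : List Int :=
  let h1 := A.foldl
    (fun d x => if d.contains x then d.insert x (d.getD x 0 + 1) else d.insert x 1)
    (PySem.Dict.empty : PySem.Dict Int Int)
  let h2 := B.foldl
    (fun d y => if d.contains y then d.insert y (d.getD y 0 + 1) else d.insert y 1)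
    (PySem.Dict.empty : PySem.Dict Int Int)
  -- for k, freq in h2.items(): if k in h1: append k h1[k] times; del h1[k]
  let st := h2.items.foldl
    (fun (st : List Int × PySem.Dict Int Int) p =>
      if st.2.contains p.1 then
        (st.1 ++ List.replicate (st.2.getD p.1 0).toNat p.1, st.2.erase p.1)
      else st)
    ([], h1)
  -- res = sorted(h1.items())  (tuples compare lexicographically)
  let res := PySem.List.sorted2 st.2.items (fun p => p.1) (fun p => p.2) false
  -- for k, item in res: append k item times
  res.foldl (fun result p => result ++ List.replicate p.2.toNat p.1) st.1

-- ===== PORT B =====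
def solve_alt (A : List Int) (B : List Int) : List Int :=
  let order := PySem.List.dedup B
  let present := PySem.Set.ofList order
  let front := order.flatMap (fun y => A.filter (fun x => x == y))
  let rest := PySem.List.sorted (A.filter (fun x => !(PySem.Set.contains present x))) (fun x => x) false
  front ++ rest

-- ===== PRECONDITION & SPEC =====
def Spec_solve (A : List Int) (B : List Int) (out : List Int) : Prop := out = solve_alt A B
instance (A : List Int) (B : List Int) (out : List Int) : Decidable (Spec_solve A B out) := by unfold Spec_solve; infer_instance

-- ===== CLAIM (what is proved, stated in full; the proofs are below) =====
def Claim_equal_solve : Prop := ∀ (A : List Int) (B : List Int), Dom_solve A B → Spec_solve A B (solve A B)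

-- ===== LEMMAS AND PROOFS =====


lemma pvCounterFold (l : List Int) :
    l.foldl (fun d x => if d.contains x then d.insert x (d.getD x 0 + 1) else d.insert x 1)
      (PySem.Dict.empty : PySem.Dict Int Int) = PySem.Dict.counter l := by
  rw [← PySem.Dict.foldl_insert_getD_add_one_eq_counter]
  congr 1
  funext d x
  by_cases h : d.contains x = true
  · simp [h]
  · simp only [Bool.not_eq_true] at h
    simp [h, PySem.Dict.getD_of_not_contains d 0 h]

lemma pvFindFilterNe (l : List (Int × Int)) (k k' : Int) (h : k' ≠ k) :
    (l.filter (fun p => !(p.1 == k))).find? (fun p => p.1 == k') = l.find? (fun p => p.1 == k') := by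
  induction l with
  | nil => simp
  | cons p t ih =>
    by_cases hk : p.1 = k
    · have hp : (p.1 == k') = false := by
        rw [hk]; simp; intro hh; exact h hh.symm
      have hp' : (k == k') = false := hk ▸ hp
      simp [List.filter_cons, hk, List.find?_cons, hp, hp', ih]
    · have hne : (!(p.1 == k)) = true := by simp [hk]
      cases hpk : (p.1 == k') with
      | true => simp [List.filter_cons, hne, List.find?_cons, hpk]
      | false => simp [List.filter_cons, hne, List.find?_cons, hpk, ih]

lemma pvGetErase (d : PySem.Dict Int Int) (k k' : Int) (h : k' ≠ k) :
    (d.erase k).get? k' = d.get? k' := by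
  simp [PySem.Dict.erase, PySem.Dict.get?, pvFindFilterNe _ _ _ h]

lemma pvContainsErase (d : PySem.Dict Int Int) (k k' : Int) (h : k' ≠ k) :
    (d.erase k).contains k' = d.contains k' := by
  rw [PySem.Dict.contains_eq_isSome_get?, PySem.Dict.contains_eq_isSome_get?, pvGetErase _ _ _ h]

lemma pvGetDErase (d : PySem.Dict Int Int) (k k' : Int) (h : k' ≠ k) :
    (d.erase k).getD k' 0 = d.getD k' 0 := by
  simp [PySem.Dict.getD, pvGetErase _ _ _ h]

lemma pvEraseNotContains (d : PySem.Dict Int Int) (k : Int) (h : d.contains k = false) :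
    d.erase k = d := by
  apply PySem.Dict.ext
  show d.items.filter _ = d.items
  rw [List.filter_eq_self]
  intro p hp
  have hpk : (p.1 == k) = false := by
    by_contra hc
    simp only [Bool.not_eq_false] at hc
    have h2 : (d.items.any fun q => q.1 == k) = true := List.any_eq_true.mpr ⟨p, hp, hc⟩
    rw [show (d.items.any fun q => q.1 == k) = d.contains k from rfl, h] at h2
    exact Bool.false_ne_true h2
  simp [hpk]

lemma pvFilterBeq (l : List Int) (k : Int) :
    l.filter (fun x => x == k) = List.replicate (l.count k) k := by
  induction l with
  | nil => simp
  | cons a t ih =>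
    by_cases ha : a = k
    · subst ha; simp [List.filter_cons, List.count_cons, ih, List.replicate_succ]
    · simp [List.filter_cons, List.count_cons, ha, ih]

lemma pvItemsFoldlErase (ps : List (Int × Int)) (d : PySem.Dict Int Int) :
    (ps.foldl (fun d p => d.erase p.1) d).items
      = d.items.filter (fun q => !((ps.map (fun p => p.1)).contains q.1)) := by
  induction ps generalizing d with
  | nil => simp
  | cons p t ih =>
    simp only [List.foldl_cons, ih, List.map_cons]
    show (d.items.filter _).filter _ = _
    rw [List.filter_filter]
    congr 1
    funext q
    simp [List.contains_cons, Bool.not_or, Bool.and_comm, BEq.comm]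

lemma pvLoopA (ps : List (Int × Int)) (res : List Int) (d : PySem.Dict Int Int)
    (hnd : (ps.map (fun p => p.1)).Nodup) :
    ps.foldl
      (fun (st : List Int × PySem.Dict Int Int) p =>
        if st.2.contains p.1 then
          (st.1 ++ List.replicate (st.2.getD p.1 0).toNat p.1, st.2.erase p.1)
        else st)
      (res, d)
    = (res ++ ps.flatMap (fun p => if d.contains p.1 then List.replicate (d.getD p.1 0).toNat p.1 else []),
       ps.foldl (fun d p => d.erase p.1) d) := by
  induction ps generalizing res d with
  | nil => simp
  | cons p t ih =>
    simp only [List.map_cons, List.nodup_cons] at hnd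
    obtain ⟨hp, hnd⟩ := hnd
    have hne : ∀ q ∈ t, q.1 ≠ p.1 := by
      intro q hq hqe
      exact hp (hqe ▸ List.mem_map_of_mem hq)
    have hblocks : ∀ q ∈ t,
        (if (d.erase p.1).contains q.1 then List.replicate ((d.erase p.1).getD q.1 0).toNat q.1 else [])
          = (if d.contains q.1 then List.replicate (d.getD q.1 0).toNat q.1 else []) := by
      intro q hq
      rw [pvContainsErase d p.1 q.1 (hne q hq), pvGetDErase d p.1 q.1 (hne q hq)]
    by_cases hc : d.contains p.1 = true
    · simp only [List.foldl_cons, hc, if_true, List.flatMap_cons]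
      rw [ih _ _ hnd, List.flatMap_congr hblocks, List.append_assoc]
    · simp only [Bool.not_eq_true] at hc
      simp only [List.foldl_cons, hc, if_false, List.flatMap_cons, Bool.false_eq_true]
      rw [ih _ _ hnd, pvEraseNotContains d p.1 hc]
      simp

lemma pvInsertByMap {α β : Type} (p : β → β → Bool) (f : α → β) (x : α) (l : List α) :
    PySem.List.insertBy p (f x) (l.map f)
      = (PySem.List.insertBy (fun a b => p (f a) (f b)) x l).map f := by
  induction l with
  | nil => simp [PySem.List.insertBy]
  | cons a t ih =>
    simp only [List.map_cons, PySem.List.insertBy]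
    by_cases h : p (f x) (f a) = true
    · simp [h]
    · simp [h, ih]

lemma pvFoldlInsertByMap {α β : Type} (p : β → β → Bool) (f : α → β) (S : List α) (l : List α) :
    (S.map f).foldl (fun acc y => PySem.List.insertBy p y acc) (l.map f)
      = (S.foldl (fun acc x => PySem.List.insertBy (fun a b => p (f a) (f b)) x acc) l).map f := by
  induction S generalizing l with
  | nil => simp
  | cons a t ih =>
    simp only [List.map_cons, List.foldl_cons]
    rw [pvInsertByMap, ih]

lemma pvSorted2Map (S : List Int) (c : Int → Int) :
    PySem.List.sorted2 (S.map (fun k => (k, c k))) (fun p => p.1) (fun p => p.2) false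
      = (PySem.List.sorted S (fun x => x) false).map (fun k => (k, c k)) := by
  have hfun : (fun (a b : Int) =>
      (decide (a < b) || (!decide (b < a) && decide (c a < c b)))) = (fun a b => decide (a < b)) := by
    funext a b
    rcases lt_trichotomy a b with h | h | h
    · simp [h, not_lt_of_gt h]
    · subst h; simp
    · simp [h, not_lt_of_gt h, le_of_lt h]
  simp only [PySem.List.sorted2]
  rw [show ([] : List (Int × Int)) = List.map (fun k => (k, c k)) [] from rfl, pvFoldlInsertByMap]
  rw [PySem.List.sorted_eq_foldl_insertBy]
  congr 1
  congr 1
  funext acc x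
  congr 1

lemma pvPermFlatMapCons (ks : List Int) (l : List Int) (x : Int) (hx : x ∈ ks) (hnd : ks.Nodup) :
    (ks.flatMap (fun k => (x :: l).filter (fun a => a == k))).Perm
      (x :: ks.flatMap (fun k => l.filter (fun a => a == k))) := by
  induction ks with
  | nil => simp at hx
  | cons k t ih =>
    simp only [List.nodup_cons] at hnd
    obtain ⟨hk, hnd⟩ := hnd
    simp only [List.flatMap_cons]
    rcases List.mem_cons.mp hx with hxk | hxt
    · subst hxk
      have htx : ∀ k' ∈ t, (x :: l).filter (fun a => a == k') = l.filter (fun a => a == k') := by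
        intro k' hk'
        have : ¬ (x = k') := fun he => hk (he ▸ hk')
        simp [List.filter_cons, this]
      rw [List.flatMap_congr htx]
      simp [List.filter_cons]
    · have hxk : ¬ (x = k) := by
        rintro rfl; exact hk hxt
      rw [show (x :: l).filter (fun a => a == k) = l.filter (fun a => a == k) by
        simp [List.filter_cons, hxk]]
      have h2 := List.Perm.append_left (l.filter (fun a => a == k)) (ih hxt hnd)
      exact h2.trans List.perm_middle

lemma pvPermFlatMapFilter (ks : List Int) (l : List Int) (hnd : ks.Nodup)
    (hcov : ∀ x ∈ l, x ∈ ks) :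
    (ks.flatMap (fun k => l.filter (fun a => a == k))).Perm l := by
  induction l with
  | nil => simp
  | cons x t ih =>
    have h1 := pvPermFlatMapCons ks t x (hcov x (by simp)) hnd
    exact h1.trans (List.Perm.cons x (ih (fun y hy => hcov y (by simp [hy]))))

lemma pvPairwiseFlatMapReplicate (T : List Int) (n : Int → Nat) (h : T.Pairwise (· < ·)) :
    (T.flatMap (fun k => List.replicate (n k) k)).Pairwise (· ≤ ·) := by
  induction T with
  | nil => simp
  | cons k t ih =>
    simp only [List.pairwise_cons] at h
    obtain ⟨hk, ht⟩ := h
    simp only [List.flatMap_cons]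
    rw [List.pairwise_append]
    refine ⟨List.pairwise_replicate.mpr (Or.inr le_rfl), ih ht, ?_⟩
    intro a ha b hb
    have ha' : a = k := (List.eq_of_mem_replicate ha)
    obtain ⟨k', hk', hb'⟩ := List.mem_flatMap.mp hb
    have hb'' : b = k' := List.eq_of_mem_replicate hb'
    rw [ha', hb'']
    exact le_of_lt (hk k' hk')

lemma pvMain (A B : List Int) : solve A B = solve_alt A B := by
  have hks : (PySem.Set.ofList B).Nodup := PySem.Set.nodup_ofList B
  unfold solve solve_alt
  simp only [pvCounterFold, PySem.Dict.items_counter, PySem.List.dedup_eq_ofList,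
    PySem.Set.ofList_ofList, PySem.Set.contains]
  have hmapfst : (List.map (fun k => (k, (List.count k B : Int))) (PySem.Set.ofList B)).map
      (fun p => p.1) = PySem.Set.ofList B := by
    rw [List.map_map]
    have h : ((fun p : Int × Int => p.1) ∘ fun k => (k, (List.count k B : Int))) = id := rfl
    rw [h, List.map_id]
  rw [pvLoopA _ [] _ (by rw [hmapfst]; exact hks)]
  rw [pvItemsFoldlErase, hmapfst]
  rw [List.nil_append, List.flatMap_map, PySem.Dict.items_counter, List.filter_map]
  simp only [Function.comp_def, PySem.Dict.contains_counter, PySem.Dict.getD_counter,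
    Int.toNat_natCast]
  have hfront : ∀ k ∈ PySem.Set.ofList B,
      (if A.contains k = true then List.replicate (A.count k) k else [])
        = A.filter (fun x => x == k) := by
    intro k _
    by_cases h : A.contains k = true
    · rw [if_pos h, pvFilterBeq]
    · have hmem : k ∉ A := by
        intro hm
        exact h (List.contains_iff_mem.mpr hm)
      rw [if_neg h, pvFilterBeq, List.count_eq_zero_of_not_mem hmem]
      rfl
  rw [List.flatMap_congr hfront, pvSorted2Map, PySem.List.foldl_append_eq_flatMap,
    List.flatMap_map]
  simp only [Int.toNat_natCast]
  congr 1
  set P := fun x : Int => !((PySem.Set.ofList B).contains x) with hP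
  set S := (PySem.Set.ofList A).filter P with hS
  set T := PySem.List.sorted S (fun x => x) false with hT
  have hndS : S.Nodup := (PySem.Set.nodup_ofList A).filter _
  have hndT : T.Nodup := (PySem.List.sorted_perm S (fun x => x) false).symm.nodup hndS
  have hTle : T.Pairwise (fun a b => a ≤ b) := PySem.List.sorted_pairwise S (fun x => x)
  have hTlt : T.Pairwise (· < ·) := by
    have hne : T.Pairwise (fun a b => a ≠ b) := hndT
    exact (hTle.and hne).imp (fun h => lt_of_le_of_ne h.1 h.2)
  have hblocks : ∀ k ∈ T, List.replicate (A.count k) k = (A.filter P).filter (fun a => a == k) := by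
    intro k hk
    have hkS : k ∈ S := (PySem.List.mem_sorted S (fun x => x) false k).mp hk
    have hPk : P k = true := (List.mem_filter.mp hkS).2
    rw [pvFilterBeq, List.count_filter hPk]
  have hcov : ∀ x ∈ A.filter P, x ∈ T := by
    intro x hx
    obtain ⟨hxA, hPx⟩ := List.mem_filter.mp hx
    exact (PySem.List.mem_sorted S (fun x => x) false x).mpr
      (List.mem_filter.mpr ⟨(PySem.Set.mem_ofList A x).mpr hxA, hPx⟩)
  have hperm : (T.flatMap (fun k => List.replicate (A.count k) k)).Perm (A.filter P) := by
    rw [List.flatMap_congr hblocks]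
    exact pvPermFlatMapFilter T (A.filter P) hndT hcov
  exact (PySem.List.sorted_id_eq_of_perm_of_pairwise (A.filter P) _ hperm
    (pvPairwiseFlatMapReplicate T _ hTlt)).symm


-- ===== VERDICT (by name: the statement is the Claim_ definition above) =====
theorem solve_spec : Claim_equal_solve := by
  intro A B _
  unfold Spec_solve
  exact pvMain A B
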